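-- pv_equiv track=rewrite | github.com/Ricky-Hu5918/Python-Lab | 914_X_of_a_Kind_in_a_Deck_of_Cards.py | hasGroupsSizeX2
-- ===== SOURCE A (Python) =====
-- def hasGroupsSizeX2(deck) -> bool:
--     dict_deck = dict()
--     for each in deck:  #统计次数
--         dict_deck[each] = dict_deck.get(each, 0) + 1
--
--     #求最大公约数
--     x = -1
--     for each in dict_deck.values():
--         x = each if x == -1 else mygcd(x, each)
--         if x == 1:
--             return False
--
--     return x >= 2
--
-- def mygcd(a, b):
--     return a if b==0 else mygcd(b, a%b)
-- ===== SOURCE B (Python) =====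
-- def hasGroupsSizeX2(deck) -> bool:
--     counts = {}
--     for c in deck:
--         counts[c] = counts.get(c, 0) + 1
--     if not counts:
--         return False
--     vals = list(counts.values())
--     m = min(vals)
--     for g in range(2, m + 1):
--         if all(v % g == 0 for v in vals):
--             return True
--     return False
-- ===== Notes on version B (the rewrite author's own statement) =====
-- stated objective: alternative
-- what changed: Replaces A's Euclidean-gcd fold with early exit over the counts by trial division: try each candidate group size g from 2 up to the minimum count and return True as soon as one divides every count.
import Mathlib
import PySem

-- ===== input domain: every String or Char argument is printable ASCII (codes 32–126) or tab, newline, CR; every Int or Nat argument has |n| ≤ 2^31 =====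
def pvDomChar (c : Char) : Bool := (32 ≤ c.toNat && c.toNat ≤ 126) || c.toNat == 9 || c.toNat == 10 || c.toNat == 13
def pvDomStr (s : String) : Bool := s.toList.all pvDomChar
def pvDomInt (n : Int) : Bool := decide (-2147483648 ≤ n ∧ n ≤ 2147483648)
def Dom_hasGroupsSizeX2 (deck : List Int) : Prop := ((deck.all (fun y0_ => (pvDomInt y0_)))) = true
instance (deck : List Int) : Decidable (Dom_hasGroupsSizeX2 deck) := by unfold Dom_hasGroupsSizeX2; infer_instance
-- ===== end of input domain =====

-- B replaces A's Euclidean-gcd fold over the counts by trial division over candidate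
-- group sizes 2..min(counts); same return value on every input (alternative, not faster).

-- ===== PORT A =====
lemma mygcd_term (a b : Int) (hb : ¬ b == 0) : (PySem.Int.mod a b).natAbs < b.natAbs := by
  simp at hb
  rcases lt_or_gt_of_ne hb with h | h
  · have := PySem.Int.mod_neg_bounds a h
    omega
  · have h1 := PySem.Int.mod_nonneg a h
    have h2 := PySem.Int.mod_lt a h
    omega

def mygcd (a b : Int) : Int :=
  if b == 0 then a else mygcd b (PySem.Int.mod a b)
termination_by b.natAbs
decreasing_by exact mygcd_term a b (by simpa using ‹¬ (b == 0) = true›)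

-- the 'for each in dict_deck.values()' loop with its early 'return False'
def gcdLoopA (x : Int) : List Int → Bool
  | [] => decide (x ≥ 2)
  | v :: rest =>
    let x' := if x == -1 then v else mygcd x v
    if x' == 1 then false else gcdLoopA x' rest

def hasGroupsSizeX2 (deck : List Int) : Bool :=
  let dict_deck := deck.foldl (fun d each => d.insert each (d.getD each 0 + 1))
    (PySem.Dict.empty : PySem.Dict Int Int)
  gcdLoopA (-1) dict_deck.values

-- ===== PORT B =====
-- the 'for g in range(2, m+1)' loop with its early 'return True'
def trialLoopB (vals : List Int) : List Int → Bool
  | [] => false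
  | g :: rest =>
    if vals.all (fun v => PySem.Int.mod v g == 0) then true else trialLoopB vals rest

def hasGroupsSizeX2_alt (deck : List Int) : Bool :=
  let counts := deck.foldl (fun d c => d.insert c (d.getD c 0 + 1))
    (PySem.Dict.empty : PySem.Dict Int Int)
  if counts.size = 0 then false
  else
    let vals := counts.values
    match PySem.List.min? vals (fun v => v) with
    | none => false
    | some m => trialLoopB vals (PySem.List.pyRange 2 (m + 1) 1)

-- ===== PRECONDITION & SPEC =====
def Spec_hasGroupsSizeX2 (deck : List Int) (out : Bool) : Prop := out = hasGroupsSizeX2_alt deck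
instance (deck : List Int) (out : Bool) : Decidable (Spec_hasGroupsSizeX2 deck out) := by unfold Spec_hasGroupsSizeX2; infer_instance

-- ===== CLAIM (what is proved, stated in full; the proofs are below) =====
def Claim_equal_hasGroupsSizeX2 : Prop := ∀ (deck : List Int), Dom_hasGroupsSizeX2 deck → Spec_hasGroupsSizeX2 deck (hasGroupsSizeX2 deck)

-- ===== LEMMAS AND PROOFS =====

-- mygcd on nonnegative arguments is Int.gcd
lemma mygcd_eq_gcd (a b : Int) (ha : 0 ≤ a) (hb : 0 ≤ b) : mygcd a b = (Int.gcd a b : Int) := by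
  induction hn : b.natAbs using Nat.strong_induction_on generalizing a b with
  | _ n ih =>
    by_cases h0 : b = 0
    · subst h0
      rw [mygcd]
      simp only [BEq.rfl, if_true, Int.gcd_zero_right]
      omega
    · have hbpos : 0 < b := lt_of_le_of_ne hb (Ne.symm h0)
      rw [mygcd]
      rw [if_neg (by simpa using h0)]
      have hmod : PySem.Int.mod a b = a % b := PySem.Int.mod_eq_emod_of_pos (a := a) hbpos
      have hr0 : 0 ≤ a % b := Int.emod_nonneg a h0
      have hrlt : a % b < b := Int.emod_lt_of_pos a hbpos
      rw [hmod, ih (a % b).natAbs (by omega) b (a % b) hb hr0 rfl]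
      congr 1
      have hcast : (a % b).natAbs = a.natAbs % b.natAbs := by
        have h' : ((a % b).natAbs : Int) = (a.natAbs : Int) % (b.natAbs : Int) := by
          rw [Int.natAbs_of_nonneg hr0, Int.natAbs_of_nonneg ha, Int.natAbs_of_nonneg hb]
        exact_mod_cast h'
      unfold Int.gcd
      rw [hcast, Nat.gcd_comm b.natAbs, ← Nat.gcd_rec, Nat.gcd_comm]

-- the gcd fold on natAbs
def gfold (a : Nat) (l : List Int) : Nat := l.foldl (fun x w => Nat.gcd x w.natAbs) a

lemma gfold_dvd_init (l : List Int) (a : Nat) : gfold a l ∣ a := by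
  induction l generalizing a with
  | nil => exact dvd_rfl
  | cons v t ih =>
    exact dvd_trans (ih (Nat.gcd a v.natAbs)) (Nat.gcd_dvd_left _ _)

lemma gfold_dvd_mem (l : List Int) (a : Nat) (w : Int) (hw : w ∈ l) : gfold a l ∣ w.natAbs := by
  induction l generalizing a with
  | nil => cases hw
  | cons v t ih =>
    rcases List.mem_cons.mp hw with h | h
    · subst h
      exact dvd_trans (gfold_dvd_init t _) (Nat.gcd_dvd_right _ _)
    · exact ih _ h

lemma dvd_gfold (l : List Int) (a d : Nat) (hda : d ∣ a) (hl : ∀ w ∈ l, d ∣ w.natAbs) :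
    d ∣ gfold a l := by
  induction l generalizing a with
  | nil => exact hda
  | cons v t ih =>
    exact ih _ (Nat.dvd_gcd hda (hl v (List.mem_cons_self))) (fun w hw => hl w (List.mem_cons_of_mem _ hw))

lemma gfold_pos (l : List Int) (a : Nat) (ha : 0 < a) : 0 < gfold a l := by
  induction l generalizing a with
  | nil => exact ha
  | cons v t ih => exact ih _ (Nat.gcd_pos_of_pos_left _ ha)

lemma gfold_one (l : List Int) : gfold 1 l = 1 := by
  induction l with
  | nil => rfl
  | cons v t ih => simpa [gfold, Nat.gcd_one_left] using ih

-- A's loop from a positive running value computes "gcd of natAbs values ≥ 2"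
lemma gcdLoopA_char (l : List Int) (x : Int) (hx : 1 ≤ x) (hl : ∀ w ∈ l, 1 ≤ w) :
    gcdLoopA x l = decide (2 ≤ gfold x.natAbs l) := by
  induction l generalizing x with
  | nil =>
    simp [gcdLoopA, gfold]
    omega
  | cons v t ih =>
    have hv : 1 ≤ v := hl v (List.mem_cons_self)
    have hxne : ¬ ((x == -1) = true) := by simp; omega
    have hg : mygcd x v = (Int.gcd x v : Int) := mygcd_eq_gcd x v (by omega) (by omega)
    have hgpos : 0 < Int.gcd x v := Nat.gcd_pos_of_pos_left _ (by omega)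
    rw [gcdLoopA]
    simp only [hxne, Bool.false_eq_true, if_false, hg]
    have hfold : gfold x.natAbs (v :: t) = gfold (Int.gcd x v) t := rfl
    by_cases h1 : Int.gcd x v = 1
    · have hone : gfold x.natAbs (v :: t) = 1 := by rw [hfold, h1, gfold_one]
      simp [h1, hone]
    · have hne : ¬ (((Int.gcd x v : Int) == 1) = true) := by simp; exact_mod_cast h1
      rw [if_neg hne, ih ((Int.gcd x v : Int)) (by omega) (fun w hw => hl w (List.mem_cons_of_mem _ hw))]
      rw [hfold]
      simp

-- B's loop is an 'any' over the candidate list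
lemma trialLoopB_eq_any (vals gs : List Int) :
    trialLoopB vals gs = gs.any (fun g => vals.all (fun v => PySem.Int.mod v g == 0)) := by
  induction gs with
  | nil => rfl
  | cons g t ih =>
    rw [trialLoopB, List.any_cons]
    by_cases h : vals.all (fun v => PySem.Int.mod v g == 0) <;> simp [h, ih]

-- main bridge: on a nonempty list of values all ≥ 1, A's gcd test equals B's trial division
lemma main_bridge (v : Int) (t : List Int) (m : Int)
    (hl : ∀ w ∈ (v :: t), 1 ≤ w)
    (hmem : m ∈ (v :: t)) (hmin : ∀ w ∈ (v :: t), m ≤ w) :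
    gcdLoopA (-1) (v :: t) = trialLoopB (v :: t) (PySem.List.pyRange 2 (m + 1) 1) := by
  have hv : 1 ≤ v := hl v (List.mem_cons_self)
  have hA : gcdLoopA (-1) (v :: t) = if (v == 1) then false else gcdLoopA v t := by
    rw [gcdLoopA]; simp
  rw [hA, trialLoopB_eq_any]
  by_cases h1 : v = 1
  · -- a count equal to 1 kills both sides
    subst h1
    rw [if_pos (by simp)]
    symm
    rw [List.any_eq_false]
    intro g hg
    rw [PySem.List.mem_pyRange_one] at hg
    intro hall
    rw [List.all_eq_true] at hall
    have := hall 1 (List.mem_cons_self)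
    rw [beq_iff_eq, PySem.Int.mod_eq_zero_iff_dvd] at this
    have := Int.le_of_dvd (by omega) this
    omega
  · rw [if_neg (by simpa using h1)]
    rw [gcdLoopA_char t v hv (fun w hw => hl w (List.mem_cons_of_mem _ hw))]
    set G := gfold v.natAbs t with hG
    have hGpos : 0 < G := gfold_pos t v.natAbs (by omega)
    have hGdvd : ∀ w ∈ (v :: t), G ∣ w.natAbs := by
      intro w hw
      rcases List.mem_cons.mp hw with h | h
      · subst h; exact gfold_dvd_init t _
      · exact gfold_dvd_mem t _ w h
    by_cases h2 : 2 ≤ G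
    · rw [decide_eq_true (by exact_mod_cast h2)]
      symm
      rw [List.any_eq_true]
      refine ⟨(G : Int), ?_, ?_⟩
      · rw [PySem.List.mem_pyRange_one]
        have hdm := Nat.le_of_dvd (by have := hl m hmem; omega) (hGdvd m hmem)
        constructor
        · omega
        · have := hl m hmem; omega
      · rw [List.all_eq_true]
        intro w hw
        rw [beq_iff_eq, PySem.Int.mod_eq_zero_iff_dvd]
        have : (G : Int) ∣ (w.natAbs : Int) := Int.natCast_dvd_natCast.mpr (hGdvd w hw)
        rwa [Int.natAbs_of_nonneg (by have := hl w hw; omega)] at this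
    · rw [decide_eq_false (by exact_mod_cast h2)]
      symm
      rw [List.any_eq_false]
      intro g hg
      rw [PySem.List.mem_pyRange_one] at hg
      intro hall
      rw [List.all_eq_true] at hall
      have hgd : g.natAbs ∣ G := by
        apply dvd_gfold
        · have := hall v (List.mem_cons_self)
          rw [beq_iff_eq, PySem.Int.mod_eq_zero_iff_dvd] at this
          exact Int.natAbs_dvd_natAbs.mpr this
        · intro w hw
          have := hall w (List.mem_cons_of_mem _ hw)
          rw [beq_iff_eq, PySem.Int.mod_eq_zero_iff_dvd] at this
          exact Int.natAbs_dvd_natAbs.mpr this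
      have := Nat.le_of_dvd hGpos hgd
      omega

-- the counting dict is Counter(deck): its values are the multiplicities of the distinct cards
lemma counter_values (deck : List Int) :
    (deck.foldl (fun d each => d.insert each (d.getD each 0 + 1))
      (PySem.Dict.empty : PySem.Dict Int Int)).values
      = (PySem.Set.ofList deck).map (fun k => (deck.count k : Int)) := by
  rw [PySem.Dict.foldl_insert_getD_add_one_eq_counter]
  simp only [PySem.Dict.values, PySem.Dict.items_counter, List.map_map]
  rfl

lemma counter_size (deck : List Int) :
    (deck.foldl (fun d each => d.insert each (d.getD each 0 + 1))
      (PySem.Dict.empty : PySem.Dict Int Int)).size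
      = (PySem.Set.ofList deck).length := by
  rw [PySem.Dict.foldl_insert_getD_add_one_eq_counter]
  simp only [PySem.Dict.size, PySem.Dict.items_counter, List.length_map]

-- ===== VERDICT (by name: the statement is the Claim_ definition above) =====
theorem hasGroupsSizeX2_spec : Claim_equal_hasGroupsSizeX2 := by
  intro deck _
  unfold Spec_hasGroupsSizeX2 hasGroupsSizeX2 hasGroupsSizeX2_alt
  simp only [counter_values, counter_size]
  cases h : PySem.Set.ofList deck with
  | nil => simp [gcdLoopA]
  | cons k ks =>
    rw [if_neg (by simp)]
    simp only [List.map_cons]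
    have hge : ∀ w ∈ ((deck.count k : Int) :: ks.map (fun k => (deck.count k : Int))), 1 ≤ w := by
      intro w hw
      have hmem : ∃ k', k' ∈ (k :: ks) ∧ w = (deck.count k' : Int) := by
        rcases List.mem_cons.mp hw with h' | h'
        · exact ⟨k, List.mem_cons_self, h'⟩
        · obtain ⟨k', hk', rfl⟩ := List.mem_map.mp h'
          exact ⟨k', List.mem_cons_of_mem _ hk', rfl⟩
      obtain ⟨k', hk', rfl⟩ := hmem
      have hkd : k' ∈ deck := (PySem.Set.mem_ofList deck k').mp (h ▸ hk')
      have := List.count_pos_iff.mpr hkd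
      omega
    cases hmin : PySem.List.min? ((deck.count k : Int) :: ks.map (fun k => (deck.count k : Int))) (fun v => v) with
    | none => exact absurd hmin (by simp [PySem.List.min?_eq_none_iff])
    | some m =>
      exact main_bridge _ _ m hge (PySem.List.min?_mem hmin)
        (fun w hw => PySem.List.min?_isMin hmin w hw)
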